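-- pv_equiv track=rewrite | github.com/raghulresearcher/kaggle_comp_medgemma | backend/agents/risk_agent.py | _determine_overall_risk
-- ===== SOURCE A (Python) =====
-- from typing import Any, Dict, List
--
-- def _determine_overall_risk(assessment_results: List[Dict[str, Any]]) -> str:
--     """Determine overall risk level from individual assessments"""
--
--     risk_levels = [result["risk_level"] for result in assessment_results]
--
--     if "high" in risk_levels:
--         return "high"
--     elif "medium" in risk_levels:
--         return "medium"
--     else:
--         return "low"
-- ===== SOURCE B (Python) =====
-- def _determine_overall_risk(assessment_results):
--     """Determine overall risk level from individual assessments"""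
--     severity = max((2 if result["risk_level"] == "high" else
--                     1 if result["risk_level"] == "medium" else 0
--                     for result in assessment_results), default=0)
--     return "high" if severity == 2 else "medium" if severity == 1 else "low"
-- ===== Notes on version B (the rewrite author's own statement) =====
-- stated objective: alternative
-- what changed: Replaced the build-a-list-then-ordered-membership-chain with a single max-reduction over a numeric severity mapping (high=2, medium=1, else 0), translating the maximum back to a string.
import Mathlib
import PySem

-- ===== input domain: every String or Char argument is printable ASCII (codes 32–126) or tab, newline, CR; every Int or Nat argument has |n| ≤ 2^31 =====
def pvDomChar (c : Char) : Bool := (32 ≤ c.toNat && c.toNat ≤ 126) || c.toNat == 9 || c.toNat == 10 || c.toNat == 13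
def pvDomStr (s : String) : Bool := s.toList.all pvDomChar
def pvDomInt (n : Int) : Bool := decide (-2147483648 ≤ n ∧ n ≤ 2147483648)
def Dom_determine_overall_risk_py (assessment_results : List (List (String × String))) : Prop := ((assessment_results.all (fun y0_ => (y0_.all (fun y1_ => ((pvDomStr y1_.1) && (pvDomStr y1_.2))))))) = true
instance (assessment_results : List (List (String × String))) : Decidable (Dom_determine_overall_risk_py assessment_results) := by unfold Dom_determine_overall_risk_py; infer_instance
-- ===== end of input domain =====

-- B replaces A's list-then-ordered-membership-chain by one numeric max-severity reduction (alternative decomposition, same cost).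
-- Pre_ excludes inputs where some assessment lacks the "risk_level" key (A raises KeyError there).


-- ===== PORT A =====
-- result["risk_level"]: first-match dict lookup; the `getD ""` default never fires under Pre_ (key present)
def pvLookupRisk (result : List (String × String)) : String :=
  ((PySem.Dict.mk result).get? "risk_level").getD ""

def determine_overall_risk_py (assessment_results : List (List (String × String))) : String :=
  let risk_levels := assessment_results.map pvLookupRisk
  if "high" ∈ risk_levels then "high"
  else if "medium" ∈ risk_levels then "medium"
  else "low"

-- ===== PORT B =====
def pvSev (s : String) : Nat := if s = "high" then 2 else if s = "medium" then 1 else 0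

def determine_overall_risk_py_alt (assessment_results : List (List (String × String))) : String :=
  let severity := assessment_results.foldl (fun acc result => max acc (pvSev (pvLookupRisk result))) 0
  if severity = 2 then "high" else if severity = 1 then "medium" else "low"

-- ===== PRECONDITION & SPEC =====
-- Pre_ excludes exactly the inputs on which A raises KeyError: some assessment without a "risk_level" key.
def Pre_determine_overall_risk_py (assessment_results : List (List (String × String))) : Prop :=
  (assessment_results.all (fun r => (PySem.Dict.mk r).contains "risk_level")) = true
instance (assessment_results : List (List (String × String))) : Decidable (Pre_determine_overall_risk_py assessment_results) := by unfold Pre_determine_overall_risk_py; infer_instance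

def pvWitness_determine_overall_risk_py : (List (List (String × String))) :=
  [[("risk_level", "medium")], [("risk_level", "low")]]

def Spec_determine_overall_risk_py (assessment_results : List (List (String × String))) (out : String) : Prop := out = determine_overall_risk_py_alt assessment_results
instance (assessment_results : List (List (String × String))) (out : String) : Decidable (Spec_determine_overall_risk_py assessment_results out) := by unfold Spec_determine_overall_risk_py; infer_instance

-- ===== CLAIM (what is proved, stated in full; the proofs are below) =====
def Claim_equal_determine_overall_risk_py : Prop := ∀ (assessment_results : List (List (String × String))), Dom_determine_overall_risk_py assessment_results → Pre_determine_overall_risk_py assessment_results → Spec_determine_overall_risk_py assessment_results (determine_overall_risk_py assessment_results)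

-- ===== LEMMAS AND PROOFS =====

-- foldl max over severities shifts its accumulator out as an outer max
theorem pv_foldl_shift (l : List String) : ∀ acc : Nat,
    l.foldl (fun a s => max a (pvSev s)) acc = max acc (l.foldl (fun a s => max a (pvSev s)) 0) := by
  induction l with
  | nil => intro acc; simp
  | cons s l ih =>
      intro acc
      simp only [List.foldl_cons]
      rw [ih (max acc (pvSev s)), ih (max 0 (pvSev s))]
      omega

-- the max severity over a list equals the ordered-membership characterisation A uses
theorem pv_max_char (l : List String) :
    l.foldl (fun a s => max a (pvSev s)) 0 =
      (if "high" ∈ l then 2 else if "medium" ∈ l then 1 else 0) := by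
  induction l with
  | nil => simp
  | cons s l ih =>
      simp only [List.foldl_cons, pv_foldl_shift, ih, List.mem_cons]
      by_cases h1 : s = "high" <;> by_cases h2 : s = "medium" <;>
        simp [pvSev, h1, h2] <;> split_ifs <;> simp_all

theorem pv_fold_map (ars : List (List (String × String))) :
    ars.foldl (fun acc r => max acc (pvSev (pvLookupRisk r))) 0
      = (ars.map pvLookupRisk).foldl (fun a s => max a (pvSev s)) 0 := by
  simp [List.foldl_map]

-- ===== VERDICT (by name: the statement is the Claim_ definition above) =====
theorem determine_overall_risk_py_spec : Claim_equal_determine_overall_risk_py := by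
  intro ars _ _
  unfold Spec_determine_overall_risk_py determine_overall_risk_py determine_overall_risk_py_alt
  rw [pv_fold_map, pv_max_char]
  simp only [List.mem_map]
  split_ifs <;> simp_all
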